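-- pv_equiv track=rewrite | github.com/DataDog/datadog-agent | mcp-server/extract_commands.py | organize_commands
-- ===== SOURCE A (Python) =====
-- from collections import defaultdict
-- from typing import Dict, List, Optional, Tuple
--
-- def organize_commands(commands: List[Dict]) -> Dict[str, List[Dict]]:
--     """Organize commands by binary."""
--     by_binary = defaultdict(list)
--
--     for cmd in commands:
--         binary = cmd["binary"]
--         by_binary[binary].append(cmd)
--
--     # Sort commands within each binary
--     for binary in by_binary:
--         by_binary[binary].sort(key=lambda x: x["use"])
--
--     return dict(by_binary)
-- ===== SOURCE B (Python) =====
-- def organize_commands(commands):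
--     """Organize commands by binary: collect distinct binaries in first-occurrence
--     order, then build each group with a per-binary filtered comprehension, sorted by 'use'."""
--     binaries = []
--     for cmd in commands:
--         if cmd["binary"] not in binaries:
--             binaries.append(cmd["binary"])
--     return {b: sorted((c for c in commands if c["binary"] == b), key=lambda c: c["use"])
--             for b in binaries}
-- ===== Notes on version B (the rewrite author's own statement) =====
-- stated objective: alternative
-- what changed: A builds every group in one grouping pass into a defaultdict and then sorts each group in place; B never groups: it collects the distinct binaries in first-occurrence order and constructs each group independently by filtering the whole input for that binary and sorting the filtered list.
import Mathlib
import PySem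

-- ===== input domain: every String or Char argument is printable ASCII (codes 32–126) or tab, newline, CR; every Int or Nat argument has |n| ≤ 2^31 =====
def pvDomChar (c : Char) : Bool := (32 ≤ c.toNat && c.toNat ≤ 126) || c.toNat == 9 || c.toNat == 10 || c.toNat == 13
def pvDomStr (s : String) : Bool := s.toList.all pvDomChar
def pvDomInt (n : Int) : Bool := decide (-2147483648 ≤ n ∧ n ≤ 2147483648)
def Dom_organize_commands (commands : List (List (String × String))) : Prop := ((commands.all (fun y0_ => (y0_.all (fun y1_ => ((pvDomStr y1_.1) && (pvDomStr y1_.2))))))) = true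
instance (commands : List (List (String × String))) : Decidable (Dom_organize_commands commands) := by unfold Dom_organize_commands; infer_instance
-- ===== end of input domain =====

-- B never groups: it collects the distinct binaries in first-occurrence order and builds each
-- group independently by filtering the input for that binary and sorting it (objective: alternative).

-- cmd[k] for an assoc-list dict: first matching value; exact when the key is present (Pre_);
-- Python raises KeyError on a missing key, which Pre_ excludes (here the default "" is never reached).
def pvLookup (cmd : List (String × String)) (k : String) : String :=
  ((cmd.find? (fun p => p.1 == k)).map (·.2)).getD ""

def pvBinary (cmd : List (String × String)) : String := pvLookup cmd "binary"   -- cmd["binary"]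
def pvUse (cmd : List (String × String)) : String := pvLookup cmd "use"         -- cmd["use"]

-- ===== PORT A =====
def organize_commands (commands : List (List (String × String))) : List (String × List (List (String × String))) :=
  -- by_binary = defaultdict(list); for cmd in commands: by_binary[cmd["binary"]].append(cmd)
  -- then: for binary in by_binary: by_binary[binary].sort(key=lambda x: x["use"]); return dict(by_binary)
  (commands.foldl (fun d cmd => d.modify (pvBinary cmd) [] (fun g => g ++ [cmd]))
      (PySem.Dict.empty : PySem.Dict String (List (List (String × String))))).items.map
    (fun p => (p.1, PySem.List.sorted p.2 pvUse false))

-- ===== PORT B =====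
def organize_commands_alt (commands : List (List (String × String))) : List (String × List (List (String × String))) :=
  -- binaries = []; for cmd in commands: if cmd["binary"] not in binaries: binaries.append(cmd["binary"])
  -- return {b: sorted((c for c in commands if c["binary"] == b), key=lambda c: c["use"]) for b in binaries}
  (commands.foldl (fun s cmd => PySem.Set.add s (pvBinary cmd))
      (PySem.Set.empty : PySem.Set String)).map
    (fun b => (b, PySem.List.sorted (commands.filter (fun c => pvBinary c == b)) pvUse false))

-- ===== PRECONDITION & SPEC =====
-- Pre_ excludes exactly the inputs on which the Python A raises KeyError: a command dict
-- missing the "binary" or the "use" key.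
def Pre_organize_commands (commands : List (List (String × String))) : Prop :=
  ∀ cmd ∈ commands, "binary" ∈ cmd.map (·.1) ∧ "use" ∈ cmd.map (·.1)
instance (commands : List (List (String × String))) : Decidable (Pre_organize_commands commands) := by
  unfold Pre_organize_commands; infer_instance

def pvWitness_organize_commands : (List (List (String × String))) :=
  [[("binary", "git"), ("use", "git status")], [("binary", "ls"), ("use", "ls -l")],
   [("binary", "git"), ("use", "git add")]]

def Spec_organize_commands (commands : List (List (String × String))) (out : List (String × List (List (String × String)))) : Prop := out = organize_commands_alt commands
instance (commands : List (List (String × String))) (out : List (String × List (List (String × String)))) : Decidable (Spec_organize_commands commands out) := by unfold Spec_organize_commands; infer_instance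

-- ===== CLAIM =====
def Claim_equal_organize_commands : Prop := ∀ (commands : List (List (String × String))), Dom_organize_commands commands → Pre_organize_commands commands → Spec_organize_commands commands (organize_commands commands)

-- ===== LEMMAS AND PROOFS =====

-- A's grouping dict, characterised: keys in first-occurrence order, value = filter
theorem grouping_foldl_items {α : Type} (getB : α → String) (l : List α) :
    (l.foldl (fun d c => d.modify (getB c) [] (fun g => g ++ [c]))
        (PySem.Dict.empty : PySem.Dict String (List α))).items
      = (PySem.Set.ofList (l.map getB)).map
          (fun b => (b, l.filter (fun c => getB c == b))) := by
  have hkeys : (l.foldl (fun d c => d.modify (getB c) [] (fun g => g ++ [c]))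
      (PySem.Dict.empty : PySem.Dict String (List α))).keys = PySem.Set.ofList (l.map getB) := by
    rw [PySem.Dict.keys_foldl_modify_key l getB [] (fun _ c g => g ++ [c])]
    rfl
  have hnd : (l.foldl (fun d c => d.modify (getB c) [] (fun g => g ++ [c]))
      (PySem.Dict.empty : PySem.Dict String (List α))).keys.Nodup :=
    PySem.Dict.nodup_keys_foldl_modify_key l getB [] (fun _ c g => g ++ [c]) _ PySem.Dict.nodup_keys_empty
  have hgetD : ∀ b, (l.foldl (fun d c => d.modify (getB c) [] (fun g => g ++ [c]))
      (PySem.Dict.empty : PySem.Dict String (List α))).getD b [] = l.filter (fun c => getB c == b) := by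
    intro b
    have : l.foldl (fun d c => d.modify (getB c) [] (fun g => g ++ [c]))
        (PySem.Dict.empty : PySem.Dict String (List α))
        = (l.map (fun c => (getB c, c))).foldl (fun d p => d.modify p.1 [] (fun g => g ++ [p.2]))
          PySem.Dict.empty := by
      rw [List.foldl_map]
    rw [this, PySem.Dict.getD_foldl_modify_append, List.filter_map, List.map_map]
    simp [Function.comp_def]
  rw [PySem.Dict.items_eq_map_keys _ hnd ([] : List α), hkeys]
  exact List.map_congr_left (fun b _ => by rw [hgetD b])

-- ===== VERDICT (by name: the statement is the Claim_ definition above) =====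
theorem organize_commands_spec : Claim_equal_organize_commands := by
  intro commands _ _
  unfold Spec_organize_commands organize_commands organize_commands_alt
  rw [grouping_foldl_items pvBinary commands, List.map_map,
    show (commands.foldl (fun s cmd => PySem.Set.add s (pvBinary cmd))
        (PySem.Set.empty : PySem.Set String)) = PySem.Set.ofList (commands.map pvBinary) from by
      rw [PySem.Set.ofList_eq_foldl, List.foldl_map]; rfl]
  rfl
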